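-- pv_equiv track=rewrite | github.com/pypi-data/pypi-mirror-403 | packages/datannurpy/datannurpy-0.4.0-py3-none-any.whl/datannurpy/utils/prefix.py | find_parent_prefix
-- ===== SOURCE A (Python) =====
-- def find_parent_prefix(
--     prefix: str,
--     valid_prefixes: set[str],
--     sep: str,
-- ) -> str | None:
--     """Find the closest valid parent prefix."""
--     parts = prefix.split(sep)
--     # Try progressively shorter prefixes
--     for i in range(len(parts) - 1, 0, -1):
--         candidate = sep.join(parts[:i])
--         if candidate in valid_prefixes:
--             return candidate
--     return None
-- ===== SOURCE B (Python) =====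
-- def find_parent_prefix(
--     prefix: str,
--     valid_prefixes: set[str],
--     sep: str,
-- ) -> str | None:
--     """Find the closest valid parent prefix.
--
--     Forward accumulator scan: build each proper parent prefix left-to-right by
--     extending a running string, remember the last (= longest) one that is valid,
--     and return it after the single pass (no slicing, no re-joining, no early exit).
--     """
--     parts = prefix.split(sep)
--     acc = parts[0]
--     result = None
--     for part in parts[1:]:
--         if acc in valid_prefixes:
--             result = acc
--         acc = acc + sep + part
--     return result
-- ===== Notes on version B (the rewrite author's own statement) =====
-- stated objective: alternative
-- what changed: A scans candidate lengths backward, re-joining a slice for each candidate and returning on the first hit; B makes one forward pass extending a running accumulator string and keeps the last valid one, with no slicing, re-joining or early return.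
-- outside the precondition, e.g. on find_parent_prefix('ab', {'a'}, ''): A raises ValueError, B raises ValueError
import Mathlib
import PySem

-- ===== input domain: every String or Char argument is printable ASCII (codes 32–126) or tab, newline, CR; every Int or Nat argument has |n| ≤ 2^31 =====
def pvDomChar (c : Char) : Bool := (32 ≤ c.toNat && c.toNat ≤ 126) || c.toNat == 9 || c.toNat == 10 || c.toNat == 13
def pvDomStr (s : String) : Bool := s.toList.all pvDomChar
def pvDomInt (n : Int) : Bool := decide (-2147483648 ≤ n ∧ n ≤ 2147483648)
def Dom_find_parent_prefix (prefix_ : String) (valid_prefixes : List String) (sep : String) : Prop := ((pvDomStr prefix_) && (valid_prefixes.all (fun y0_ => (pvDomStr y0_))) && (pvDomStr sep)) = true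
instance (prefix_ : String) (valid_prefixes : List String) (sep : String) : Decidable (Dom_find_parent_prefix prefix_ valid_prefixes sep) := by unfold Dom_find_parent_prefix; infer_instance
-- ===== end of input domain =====

-- B replaces A's backward early-return scan over re-joined slices by one forward pass with a
-- running accumulator that keeps the last valid parent prefix (objective: alternative decomposition).

-- ===== PORT A =====
-- the 'for i in range(len(parts)-1, 0, -1): … return candidate' loop of A, with early return
def pyFPPloop (valid_prefixes : List String) (sep : String) (parts : List String) : List Int → Option String
  | [] => none
  | i :: rest =>
    let candidate := PySem.Str.join sep (PySem.List.slice parts none (some i))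
    if PySem.Set.contains valid_prefixes candidate then some candidate
    else pyFPPloop valid_prefixes sep parts rest

def find_parent_prefix (prefix_ : String) (valid_prefixes : List String) (sep : String) : Option String :=
  match PySem.Str.split? prefix_ sep with
  | none => none  -- prefix.split('') raises ValueError; excluded by Pre_
  | some parts => pyFPPloop valid_prefixes sep parts (PySem.List.pyRange ((parts.length : Int) - 1) 0 (-1))

-- ===== PORT B =====
-- one iteration of B's forward loop: state = (acc, result); 'acc + sep + part' = join sep [acc, part]
def fppStep (valid_prefixes : List String) (sep : String) (st : String × Option String) (part : String) : String × Option String :=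
  let result := if PySem.Set.contains valid_prefixes st.1 then some st.1 else st.2
  (PySem.Str.join sep [st.1, part], result)

def find_parent_prefix_alt (prefix_ : String) (valid_prefixes : List String) (sep : String) : Option String :=
  match PySem.Str.split? prefix_ sep with
  | none => none  -- prefix.split('') raises ValueError; excluded by Pre_
  | some parts =>
    match PySem.List.pyGet? parts 0 with
    | none => none  -- unreachable: split never returns an empty list
    | some acc0 =>
      ((PySem.List.slice parts (some 1) none).foldl (fppStep valid_prefixes sep) (acc0, none)).2

-- ===== PRECONDITION & SPEC =====
-- Pre_ excludes exactly sep = "", on which Python's str.split raises ValueError (both A and B raise).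
def Pre_find_parent_prefix (prefix_ : String) (valid_prefixes : List String) (sep : String) : Prop := sep ≠ ""
instance (prefix_ : String) (valid_prefixes : List String) (sep : String) : Decidable (Pre_find_parent_prefix prefix_ valid_prefixes sep) := by unfold Pre_find_parent_prefix; infer_instance
def pvWitness_find_parent_prefix : String × List String × String := ("a.b.c", ["a", "a.b"], ".")

def Spec_find_parent_prefix (prefix_ : String) (valid_prefixes : List String) (sep : String) (out : Option String) : Prop := out = find_parent_prefix_alt prefix_ valid_prefixes sep
instance (prefix_ : String) (valid_prefixes : List String) (sep : String) (out : Option String) : Decidable (Spec_find_parent_prefix prefix_ valid_prefixes sep out) := by unfold Spec_find_parent_prefix; infer_instance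

-- ===== CLAIM (what is proved, stated in full; the proofs are below) =====
def Claim_equal_find_parent_prefix : Prop := ∀ (prefix_ : String) (valid_prefixes : List String) (sep : String), Dom_find_parent_prefix prefix_ valid_prefixes sep → Pre_find_parent_prefix prefix_ valid_prefixes sep → Spec_find_parent_prefix prefix_ valid_prefixes sep (find_parent_prefix prefix_ valid_prefixes sep)

-- ===== LEMMAS AND PROOFS =====

-- join sep ((a ++ sep ++ b) :: rest) pulls the first separator out front
theorem joinChars_pull (sep a b : List Char) (rest : List (List Char)) :
    PySem.Chars.join sep ((a ++ sep ++ b) :: rest) = a ++ sep ++ PySem.Chars.join sep (b :: rest) := by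
  cases rest with
  | nil => simp [PySem.Chars.join_singleton]
  | cons r rs => simp [PySem.Chars.join_cons_cons, List.append_assoc]

theorem joinStr_pair (sep a b : String) (rest : List String) :
    PySem.Str.join sep (PySem.Str.join sep [a, b] :: rest) = PySem.Str.join sep (a :: b :: rest) := by
  apply String.toList_inj.mp
  simp only [PySem.Str.toList_join, List.map_cons, PySem.Str.toList_join]
  cases rest with
  | nil => simp [PySem.Chars.join_singleton, PySem.Chars.join_cons_cons]
  | cons r rs =>
    simp only [List.map_cons, List.map_nil]
    rw [PySem.Chars.join_cons_cons sep.toList a.toList b.toList [],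
        PySem.Chars.join_singleton, joinChars_pull,
        PySem.Chars.join_cons_cons sep.toList a.toList b.toList (r.toList :: List.map String.toList rs)]

-- the accumulator of B's fold is always the join of the parts consumed so far
theorem fppAcc (vp : List String) (sep : String) :
    ∀ (t : List String) (h : String) (r : Option String),
      (t.foldl (fppStep vp sep) (h, r)).1 = PySem.Str.join sep (h :: t) := by
  intro t
  induction t with
  | nil =>
    intro h r
    apply String.toList_inj.mp
    simp [PySem.Str.toList_join, PySem.Chars.join_singleton]
  | cons p t' ih =>
    intro h r
    simp only [List.foldl_cons, fppStep]
    rw [ih]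
    rw [joinStr_pair]

theorem pyRange_negone_succ (k : Nat) :
    PySem.List.pyRange ((k : Int) + 1) 0 (-1) = ((k : Int) + 1) :: PySem.List.pyRange (k : Int) 0 (-1) := by
  simp only [PySem.List.pyRange]
  norm_num
  have hif : (if 0 < k then k else 0) = k := by
    by_cases h0 : 0 < k <;> simp [h0] <;> omega
  rw [hif, List.range_succ_eq_map]
  simp only [List.map_cons, List.map_map, Nat.cast_zero, List.cons.injEq]
  refine ⟨by ring, ?_⟩
  apply List.map_congr_left
  intro x _
  simp only [Function.comp_apply]
  push_cast
  ring

-- A's loop over candidate lengths k..1 equals B's fold over the first k tail parts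
theorem loop_eq_fold (vp : List String) (sep : String) :
    ∀ (k : Nat) (h : String) (t : List String), k ≤ t.length →
      pyFPPloop vp sep (h :: t) (PySem.List.pyRange (k : Int) 0 (-1)) =
        ((t.take k).foldl (fppStep vp sep) (h, none)).2 := by
  intro k
  induction k with
  | zero =>
    intro h t _
    simp [PySem.List.pyRange, pyFPPloop]
  | succ k ih =>
    intro h t hk
    have hkl : k < t.length := by omega
    simp only [Nat.cast_add, Nat.cast_one]
    rw [pyRange_negone_succ, pyFPPloop]
    have hsl : PySem.List.slice (h :: t) none (some ((k : Int) + 1)) = h :: t.take k := by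
      rw [PySem.List.slice_to _ (by omega)]
      have h1 : ((k : Int) + 1).toNat = k + 1 := by omega
      rw [h1]
      simp
    rw [hsl]
    have htk : t.take (k + 1) = t.take k ++ [t[k]] := by
      rw [List.take_add_one, List.getElem?_eq_getElem hkl]
      rfl
    rw [htk, List.foldl_append]
    simp only [List.foldl_cons, List.foldl_nil, fppStep]
    rw [fppAcc]
    by_cases hc : PySem.Set.contains vp (PySem.Str.join sep (h :: t.take k)) = true
    · simp only [hc, if_pos]
    · simp only [hc, Bool.false_eq_true, if_false]
      exact ih h t (by omega)

-- ===== VERDICT (by name: the statement is the Claim_ definition above) =====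
theorem find_parent_prefix_spec : Claim_equal_find_parent_prefix := by
  intro p vp sep _ _
  unfold Spec_find_parent_prefix find_parent_prefix find_parent_prefix_alt
  cases hsp : PySem.Str.split? p sep with
  | none => rfl
  | some parts =>
    cases parts with
    | nil =>
      simp [PySem.List.pyRange, pyFPPloop, PySem.List.pyGet?, PySem.List.pyIdx?]
    | cons h t =>
      have hget : PySem.List.pyGet? (h :: t) (0 : Int) = some h := by
        simp [PySem.List.pyGet?, PySem.List.pyIdx?]
      have htail : PySem.List.slice (h :: t) (some (1 : Int)) none = t := by
        rw [PySem.List.slice_from _ (by omega)]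
        rfl
      simp only [hget, htail, List.length_cons]
      have hlen : (((t.length + 1 : Nat) : Int)) - 1 = (t.length : Int) := by
        push_cast
        ring
      rw [hlen, loop_eq_fold vp sep t.length h t le_rfl, List.take_length]
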